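-- pv_equiv track=rewrite | github.com/thotalakshmimounika/IntermediateDSA | Combinatorics Basics/compute ncr%m.py | solve
-- ===== SOURCE A (Python) =====
-- def solve(a,b,c):
--     v=max(a,b)
--     n=1
--     d=1
--     for i in range(b):
--         n=n*(v-i)
--     for j in range(1,b+1):
--         d=d*j
--     ans=n//d
--     return ans%c
-- ===== SOURCE B (Python) =====
-- def solve(a, b, c):
--     v = max(a, b)
--     r = 1
--     k = b
--     while k > 0:
--         r = r * (v - k + 1) // (b - k + 1)
--         k -= 1
--     return r % c
-- ===== Notes on version B (the rewrite author's own statement) =====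
-- stated objective: alternative
-- what changed: Replaces the two staged product loops (full numerator, then b!) plus one final big division with a single descending while-loop that maintains a running binomial coefficient via an exact floor-division at each step, keeping intermediates bounded by C(v,b)*b.
import Mathlib
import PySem

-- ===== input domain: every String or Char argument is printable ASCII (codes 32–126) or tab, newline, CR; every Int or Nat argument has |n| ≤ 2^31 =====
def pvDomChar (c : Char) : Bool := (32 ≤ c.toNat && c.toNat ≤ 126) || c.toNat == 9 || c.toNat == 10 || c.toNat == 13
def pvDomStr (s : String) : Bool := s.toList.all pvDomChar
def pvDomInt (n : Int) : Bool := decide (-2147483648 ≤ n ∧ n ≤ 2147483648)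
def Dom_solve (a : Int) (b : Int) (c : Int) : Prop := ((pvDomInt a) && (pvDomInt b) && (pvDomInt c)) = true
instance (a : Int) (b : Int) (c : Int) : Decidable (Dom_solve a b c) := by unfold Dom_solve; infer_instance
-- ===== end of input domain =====

-- B replaces A's two staged product loops (numerator, then b!) and a final single division
-- with one descending while-loop that maintains a running binomial coefficient by an exact
-- floor-division at each step; intermediates stay smaller (alternative decomposition).

-- ===== PORT A =====
def solve (a : Int) (b : Int) (c : Int) : Int :=
  let v := max a b
  let n := (PySem.List.pyRange 0 b 1).foldl (fun n i => n * (v - i)) 1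
  let d := (PySem.List.pyRange 1 (b + 1) 1).foldl (fun d j => d * j) 1
  let ans := PySem.Int.floordiv n d
  PySem.Int.mod ans c

-- ===== PORT B =====
-- B's 'while k > 0' loop: k counts down from b; fuel is k's value (k = fuel as an Int),
-- so the recursion is the loop body step for step.
def solveAltLoop (v b : Int) : Nat → Int → Int
  | 0, r => r
  | (k' + 1), r =>
      solveAltLoop v b k'
        (PySem.Int.floordiv (r * (v - ((k' : Int) + 1) + 1)) (b - ((k' : Int) + 1) + 1))

def solve_alt (a : Int) (b : Int) (c : Int) : Int :=
  let v := max a b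
  let r := solveAltLoop v b b.toNat 1
  PySem.Int.mod r c

-- ===== PRECONDITION & SPEC =====
-- Pre_ excludes c = 0, on which Python's final '% c' raises ZeroDivisionError in both A and B.
def Pre_solve (a : Int) (b : Int) (c : Int) : Prop := c ≠ 0
instance (a : Int) (b : Int) (c : Int) : Decidable (Pre_solve a b c) := by
  unfold Pre_solve; infer_instance

def pvWitness_solve : Int × Int × Int := (5, 2, 7)

def Spec_solve (a : Int) (b : Int) (c : Int) (out : Int) : Prop := out = solve_alt a b c
instance (a : Int) (b : Int) (c : Int) (out : Int) : Decidable (Spec_solve a b c out) := by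
  unfold Spec_solve; infer_instance

-- ===== CLAIM (what is proved, stated in full; the proofs are below) =====
def Claim_equal_solve : Prop :=
  ∀ (a : Int) (b : Int) (c : Int), Dom_solve a b c → Pre_solve a b c →
    Spec_solve a b c (solve a b c)

-- ===== LEMMAS AND PROOFS =====

-- A's numerator loop over range(b) equals the descending factorial, for k ≤ V.
theorem pv_num_fold (V : Nat) :
    ∀ (k : Nat), k ≤ V →
      (PySem.List.pyRange 0 (k : Int) 1).foldl (fun n i => n * ((V : Int) - i)) 1
        = (V.descFactorial k : Int) := by
  intro k
  induction k with
  | zero => intro _; simp [PySem.List.pyRange_one_eq_nil]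
  | succ k ih =>
    intro hk
    have h1 : ((k : Int) + 1) = ((k + 1 : Nat) : Int) := by push_cast; ring
    have : PySem.List.pyRange 0 ((k + 1 : Nat) : Int) 1
        = PySem.List.pyRange 0 (k : Int) 1 ++ [(k : Int)] := by
      rw [← h1, PySem.List.pyRange_one_succ_right (by positivity)]
    rw [this, List.foldl_append, ih (by omega)]
    simp only [List.foldl_cons, List.foldl_nil, Nat.descFactorial_succ]
    have hvk : ((V : Int) - (k : Int)) = ((V - k : Nat) : Int) := by
      have : k < V := by omega
      push_cast [Nat.cast_sub (le_of_lt this)]; ring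
    rw [hvk]; push_cast; ring

-- A's denominator loop over range(1, b+1) equals the factorial.
theorem pv_den_fold :
    ∀ (k : Nat),
      (PySem.List.pyRange 1 ((k : Int) + 1) 1).foldl (fun d j => d * j) 1
        = (k.factorial : Int) := by
  intro k
  induction k with
  | zero => simp [PySem.List.pyRange_one_eq_nil]
  | succ k ih =>
    have : PySem.List.pyRange 1 (((k : Int) + 1) + 1) 1
        = PySem.List.pyRange 1 ((k : Int) + 1) 1 ++ [(k : Int) + 1] := by
      rw [PySem.List.pyRange_one_succ_right (by omega)]
    push_cast
    rw [this, List.foldl_append, ih]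
    simp only [List.foldl_cons, List.foldl_nil, Nat.factorial_succ]
    push_cast; ring

-- Invariant of B's countdown loop: started at fuel j with r = C(V-j, B-j), it ends at C(V, B).
theorem pv_alt_inv (V B : Nat) (hBV : B ≤ V) :
    ∀ (j : Nat), j ≤ B →
      solveAltLoop (V : Int) (B : Int) j (((V - j).choose (B - j) : Nat) : Int)
        = (V.choose B : Int) := by
  intro j
  induction j with
  | zero => intro _; simp [solveAltLoop]
  | succ j ih =>
    intro hj
    have hjB : j < B := by omega
    have hjV : j < V := by omega
    rw [solveAltLoop]
    have hnum : ((V : Int) - ((j : Int) + 1) + 1) = ((V - j : Nat) : Int) := by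
      push_cast [Nat.cast_sub hjV.le]; ring
    have hden : ((B : Int) - ((j : Int) + 1) + 1) = ((B - j : Nat) : Int) := by
      push_cast [Nat.cast_sub hjB.le]; ring
    rw [hnum, hden, ← Nat.cast_mul, PySem.Int.floordiv_natCast]
    have hmul : (V - (j + 1)).choose (B - (j + 1)) * (V - j)
        = (V - j).choose (B - j) * (B - j) := by
      have hV1 : V - (j + 1) + 1 = V - j := by omega
      have hB1 : B - (j + 1) + 1 = B - j := by omega
      have := Nat.succ_mul_choose_eq (V - (j + 1)) (B - (j + 1))
      simp only [Nat.succ_eq_add_one] at this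
      rw [hV1, hB1] at this
      rw [Nat.mul_comm]
      exact this
    rw [hmul, Nat.mul_div_cancel _ (by omega : 0 < B - j)]
    exact ih (by omega)

-- The core: A's quotient equals B's loop result, for every a b.
theorem pv_core (a b : Int) :
    PySem.Int.floordiv
        ((PySem.List.pyRange 0 b 1).foldl (fun n i => n * (max a b - i)) 1)
        ((PySem.List.pyRange 1 (b + 1) 1).foldl (fun d j => d * j) 1)
      = solveAltLoop (max a b) b b.toNat 1 := by
  by_cases hb : b ≤ 0
  · rw [PySem.List.pyRange_one_eq_nil hb, PySem.List.pyRange_one_eq_nil (by omega)]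
    have : b.toNat = 0 := by omega
    rw [this]
    simp [solveAltLoop, PySem.Int.floordiv]
  · have hb : 0 < b := by omega
    set v := max a b with hv
    have hvb : b ≤ v := le_max_right a b
    have hv0 : 0 < v := lt_of_lt_of_le hb hvb
    obtain ⟨m, hm⟩ : ∃ m : Nat, b = (m : Int) := ⟨b.toNat, (Int.toNat_of_nonneg hb.le).symm⟩
    obtain ⟨V, hV⟩ : ∃ V : Nat, v = (V : Int) := ⟨v.toNat, (Int.toNat_of_nonneg hv0.le).symm⟩
    have hmV : m ≤ V := by omega
    rw [hm, hV, Int.toNat_natCast, pv_num_fold V m hmV, pv_den_fold m, PySem.Int.floordiv_natCast,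
      Nat.descFactorial_eq_factorial_mul_choose, Nat.mul_div_cancel_left _ m.factorial_pos]
    have h1 : ((1 : Int)) = (((V - m).choose (m - m) : Nat) : Int) := by
      simp [Nat.sub_self]
    rw [h1, pv_alt_inv V m hmV m le_rfl]

-- ===== VERDICT (by name: the statement is the Claim_ definition above) =====
theorem solve_spec : Claim_equal_solve := by
  intro a b c _ _
  unfold Spec_solve solve solve_alt
  simp only
  rw [pv_core a b]
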